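-- pv_equiv track=rewrite | github.com/skywong14/Frieren | scripts/build_metadata.py | normalize_caption
-- ===== SOURCE A (Python) =====
-- from typing import Iterable, List
--
-- def normalize_caption(parts: Iterable[str]) -> str:
--     """Join caption fragments while removing empty tokens and duplicate commas."""
--     tokens: List[str] = []
--     for part in parts:
--         if not part:
--             continue
--         for token in part.split(","):
--             cleaned = token.strip()
--             if cleaned:
--                 tokens.append(cleaned)
--     return ", ".join(tokens)
-- ===== SOURCE B (Python) =====
-- def normalize_caption(parts):
--     """Join caption fragments while removing empty tokens and duplicate commas.
--
--     Single streaming pass over characters with a small state machine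
--     (no split/strip): emits the output directly, buffering interior
--     whitespace and inserting ', ' when a new token starts."""
--     out = []            # output pieces
--     started = False     # inside a token whose chars are already emitted
--     pending = ""        # whitespace seen inside the current token, not yet emitted
--     for part in parts:
--         if not part:
--             continue
--         for ch in part:
--             if ch == ",":
--                 started = False
--                 pending = ""
--             elif ch.isspace():
--                 if started:
--                     pending += ch
--             else:
--                 if not started:
--                     if out:
--                         out.append(", ")
--                     started = True
--                     pending = ""
--                 out.append(pending + ch)
--                 pending = ""
--         started = False     # a part boundary also ends the current token
--         pending = ""
--     return "".join(out)
-- ===== Notes on version B (the rewrite author's own statement) =====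
-- stated objective: alternative
-- what changed: B replaces A's split-strip-filter-join pipeline by a single streaming character-level state machine (out/started/pending-whitespace) that emits the normalized output directly, never materializing token lists or calling split/strip.
import Mathlib
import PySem

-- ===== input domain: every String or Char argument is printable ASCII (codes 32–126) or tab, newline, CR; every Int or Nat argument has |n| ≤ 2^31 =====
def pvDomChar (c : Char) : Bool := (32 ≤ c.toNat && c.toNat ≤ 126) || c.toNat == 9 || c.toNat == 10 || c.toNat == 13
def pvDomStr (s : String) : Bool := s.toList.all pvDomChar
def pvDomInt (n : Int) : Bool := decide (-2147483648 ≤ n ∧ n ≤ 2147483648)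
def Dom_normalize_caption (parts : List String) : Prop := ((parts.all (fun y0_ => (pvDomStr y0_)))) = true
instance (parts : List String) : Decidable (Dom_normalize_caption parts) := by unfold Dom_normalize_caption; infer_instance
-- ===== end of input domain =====

-- B replaces A's split/strip/filter/join pipeline by one streaming character-level
-- state machine that emits the output directly (objective: alternative).

-- ===== PORT A =====
-- tokens accumulated by a fold over parts; inner fold over part.split(",")
def normalize_caption (parts : List String) : String :=
  let tokens : List (List Char) := parts.foldl
    (fun tokens part =>
      if part == "" then tokens   -- "if not part: continue"
      else
        -- part.split(",") : sep is non-empty, so Python's split is Chars.splitOn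
        (PySem.Chars.splitOn part.toList [',']).foldl
          (fun tks token =>
            let cleaned := PySem.Chars.strip token
            if !cleaned.isEmpty then tks ++ [cleaned] else tks)
          tokens)
    []
  String.ofList (PySem.Chars.join ", ".toList tokens)

-- ===== PORT B =====
-- B-side helper: the loop body of B's inner character loop (state = (out, started, pending));
-- ch.isspace() → PySem.Chars.isspace (exact)
def pvStepB (s : List Char × Bool × List Char) (ch : Char) : List Char × Bool × List Char :=
  let (out, started, pending) := s
  if ch = ',' then (out, false, ([] : List Char))
  else if PySem.Chars.isspace ch then
    (out, started, if started then pending ++ [ch] else pending)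
  else if !started then
    ((if out.isEmpty then out else out ++ [',', ' ']) ++ [ch], true, ([] : List Char))
  else (out ++ pending ++ [ch], true, ([] : List Char))

def normalize_caption_alt (parts : List String) : String :=
  let final := parts.foldl
    (fun (st : List Char × Bool × List Char) part =>
      if part == "" then st   -- "if not part: continue"
      else
        let st2 := part.toList.foldl pvStepB st
        (st2.1, false, []))   -- a part boundary also ends the current token
    (([] : List Char), false, ([] : List Char))
  String.ofList final.1

-- ===== PRECONDITION & SPEC =====
def Spec_normalize_caption (parts : List String) (out : String) : Prop := out = normalize_caption_alt parts
instance (parts : List String) (out : String) : Decidable (Spec_normalize_caption parts out) := by unfold Spec_normalize_caption; infer_instance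

-- ===== CLAIM (what is proved, stated in full; the proofs are below) =====
def Claim_equal_normalize_caption : Prop := ∀ (parts : List String), Dom_normalize_caption parts → Spec_normalize_caption parts (normalize_caption parts)

-- ===== LEMMAS AND PROOFS =====

/-- Simple structural single-char comma split (proof-side model of `Chars.splitOn · [',']`). -/
def csplit : List Char → List (List Char)
  | [] => [[]]
  | c :: rest =>
    if c = ',' then [] :: csplit rest
    else (csplit rest).modifyHead (c :: ·)

theorem csplit_ne_nil (l : List Char) : csplit l ≠ [] := by
  induction l with
  | nil => simp [csplit]
  | cons c rest ih =>
    simp only [csplit]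
    split
    · simp
    · cases h : csplit rest with
      | nil => exact absurd h ih
      | cons t ts => simp [List.modifyHead]

theorem go_eq_csplit : ∀ (fuel : Nat) (l cur : List Char) (acc : List (List Char)),
    l.length ≤ fuel →
    PySem.Chars.splitOn.go [','] fuel l cur acc
      = acc.reverse ++ (csplit l).modifyHead (cur.reverse ++ ·) := by
  intro fuel
  induction fuel with
  | zero =>
    intro l cur acc h
    have : l = [] := List.eq_nil_of_length_eq_zero (Nat.le_zero.mp h)
    subst this
    simp [PySem.Chars.splitOn.go, csplit, List.modifyHead]
  | succ f ih =>
    intro l cur acc h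
    cases l with
    | nil => simp [PySem.Chars.splitOn.go, csplit, List.modifyHead]
    | cons c rest =>
      by_cases hc : c = ','
      · subst hc
        have hpref : List.isPrefixOf [','] (',' :: rest) = true := by
          simp [List.isPrefixOf]
        rw [PySem.Chars.splitOn.go]
        simp only [hpref, if_true, List.length_cons, List.length_nil,
          Nat.zero_add, List.drop_succ_cons, List.drop_zero]
        rw [ih rest [] (cur.reverse :: acc) (by simpa using Nat.le_of_succ_le_succ h)]
        simp only [csplit, List.modifyHead, List.reverse_nil, List.nil_append,
          List.reverse_cons, List.append_assoc, List.cons_append]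
        cases csplit rest <;> simp
      · have hpref : List.isPrefixOf [','] (c :: rest) = false := by
          simp [List.isPrefixOf, Ne.symm hc]
        rw [PySem.Chars.splitOn.go]
        simp only [hpref, Bool.false_eq_true, if_false]
        rw [ih rest (c :: cur) acc (by simpa using Nat.le_of_succ_le_succ h)]
        simp only [csplit, hc, if_false]
        cases hr : csplit rest with
        | nil => exact absurd hr (csplit_ne_nil rest)
        | cons t ts => simp [List.modifyHead]

theorem splitOn_comma (l : List Char) :
    PySem.Chars.splitOn l [','] = csplit l := by
  unfold PySem.Chars.splitOn
  rw [go_eq_csplit (l.length + 1) l [] [] (Nat.le_succ _)]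
  cases h : csplit l with
  | nil => exact absurd h (csplit_ne_nil l)
  | cons t ts => simp [List.modifyHead]

/-- One part's contribution: its comma tokens, stripped, empties dropped. -/
def tokL (segs : List (List Char)) : List (List Char) :=
  (segs.map PySem.Chars.strip).filter (fun t => !t.isEmpty)

def tok (cs : List Char) : List (List Char) := tokL (csplit cs)

theorem inner_fold_eq (part : List Char) (acc : List (List Char)) :
    (PySem.Chars.splitOn part [',']).foldl
      (fun tks token =>
        let cleaned := PySem.Chars.strip token
        if !cleaned.isEmpty then tks ++ [cleaned] else tks)
      acc = acc ++ tok part := by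
  rw [splitOn_comma]
  have h := PySem.List.foldl_append_if (fun t => !(PySem.Chars.strip t).isEmpty)
    PySem.Chars.strip (csplit part) acc
  unfold tok tokL
  rw [List.filter_map]
  exact h

theorem outer_fold_eq : ∀ (parts : List String) (acc : List (List Char)),
    parts.foldl
      (fun tokens part =>
        if part == "" then tokens
        else
          (PySem.Chars.splitOn part.toList [',']).foldl
            (fun tks token =>
              let cleaned := PySem.Chars.strip token
              if !cleaned.isEmpty then tks ++ [cleaned] else tks)
            tokens)
      acc
    = acc ++ ((parts.filter (fun p => !(p == ""))).map String.toList).flatMap tok := by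
  intro parts
  induction parts with
  | nil => simp
  | cons p rest ih =>
    intro acc
    by_cases hp : p = ""
    · subst hp
      simp only [List.foldl_cons, beq_self_eq_true, if_true, List.filter_cons,
        Bool.not_true, Bool.false_eq_true, if_false]
      exact ih acc
    · have hbe : (p == "") = false := by simpa using hp
      simp only [List.foldl_cons, hbe, Bool.false_eq_true, if_false, List.filter_cons,
        Bool.not_false, if_true, List.map_cons, List.flatMap_cons]
      rw [inner_fold_eq, ih]
      simp

-- ===== B-side: the streaming machine =====

/-- Recursive model of B's inner character fold. -/
def mach : List Char → List Char → Bool → List Char → List Char × Bool × List Char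
  | [], out, started, pending => (out, started, pending)
  | c :: cs, out, started, pending =>
    if c = ',' then mach cs out false []
    else if PySem.Chars.isspace c then
      mach cs out started (if started then pending ++ [c] else pending)
    else if !started then
      mach cs ((if out.isEmpty then out else out ++ [',', ' ']) ++ [c]) true []
    else mach cs (out ++ pending ++ [c]) true []

theorem mach_cons (c : Char) (cs out : List Char) (st : Bool) (p : List Char) :
    mach (c :: cs) out st p =
      mach cs (pvStepB (out, st, p) c).1 (pvStepB (out, st, p) c).2.1
        (pvStepB (out, st, p) c).2.2 := by
  cases st <;> by_cases hc : c = ',' <;> by_cases hw : PySem.Chars.isspace c = true <;>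
    simp [mach, pvStepB, hc, hw]

theorem foldl_eq_mach : ∀ (cs out : List Char) (started : Bool) (pending : List Char),
    cs.foldl pvStepB (out, started, pending) = mach cs out started pending := by
  intro cs
  induction cs with
  | nil => intro out started pending; rfl
  | cons c cs ih =>
    intro out started pending
    rw [List.foldl_cons, mach_cons]
    exact ih _ _ _

/-- B's output renderer: append tokens, separating with ", " once output is non-empty. -/
def render (out : List Char) (ts : List (List Char)) : List Char :=
  ts.foldl (fun o t => (if o.isEmpty then o else o ++ [',', ' ']) ++ t) out

def wsOnly (p : List Char) : Prop := ∀ c ∈ p, PySem.Chars.isspace c = true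

theorem dropWhile_append_cons {p : Char → Bool} {c : Char} (h : p c = false)
    (a b : List Char) : List.dropWhile p (a ++ c :: b) = List.dropWhile p a ++ c :: b := by
  induction a with
  | nil => simp [List.dropWhile, h]
  | cons x a ih =>
    by_cases hx : p x = true
    · simp [List.dropWhile, hx, ih]
    · simp [List.dropWhile, hx]

theorem rstrip_append_cons {c : Char} (h : PySem.Chars.isspace c = false)
    (x y : List Char) :
    PySem.Chars.rstrip (x ++ c :: y) = x ++ c :: PySem.Chars.rstrip y := by
  unfold PySem.Chars.rstrip
  rw [show (x ++ c :: y).reverse = y.reverse ++ c :: x.reverse by simp,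
    dropWhile_append_cons h]
  simp

theorem rstrip_wsOnly {p : List Char} (h : wsOnly p) : PySem.Chars.rstrip p = [] := by
  have h2 : List.dropWhile PySem.Chars.isspace p.reverse = [] := by
    rw [List.dropWhile_eq_nil_iff]
    exact fun c hc => h c (List.mem_reverse.mp hc)
  simp [PySem.Chars.rstrip, h2]

theorem strip_cons_ws {c : Char} (h : PySem.Chars.isspace c = true) (l : List Char) :
    PySem.Chars.strip (c :: l) = PySem.Chars.strip l := by
  unfold PySem.Chars.strip PySem.Chars.lstrip
  simp [List.dropWhile, h]

theorem strip_cons_nws {c : Char} (h : PySem.Chars.isspace c = false) (l : List Char) :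
    PySem.Chars.strip (c :: l) = c :: PySem.Chars.rstrip l := by
  unfold PySem.Chars.strip PySem.Chars.lstrip
  rw [List.dropWhile_cons_of_neg (by simp [h])]
  exact rstrip_append_cons h [] l

theorem strip_nil : PySem.Chars.strip [] = [] := rfl

theorem csplit_cons_nc {c : Char} (hc : c ≠ ',') (cs : List Char) :
    ∃ s0 rest, csplit cs = s0 :: rest ∧ csplit (c :: cs) = (c :: s0) :: rest := by
  cases h : csplit cs with
  | nil => exact absurd h (csplit_ne_nil cs)
  | cons s0 rest => exact ⟨s0, rest, rfl, by simp [csplit, hc, h, List.modifyHead]⟩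

theorem tok_comma (cs : List Char) : tok (',' :: cs) = tok cs := by
  simp [tok, tokL, csplit, strip_nil]

theorem tok_ws {c : Char} (hc : c ≠ ',') (hw : PySem.Chars.isspace c = true)
    (cs : List Char) : tok (c :: cs) = tok cs := by
  obtain ⟨s0, rest, hcs, hccs⟩ := csplit_cons_nc hc cs
  simp [tok, tokL, hcs, hccs, strip_cons_ws hw]

/-- Main invariant of the machine. -/
theorem mach_spec : ∀ (cs out : List Char) (started : Bool) (pending : List Char),
    (started = true → out ≠ []) → wsOnly pending → (started = false → pending = []) →
    (mach cs out started pending).1 =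
      if started then
        (match csplit cs with
         | [] => out
         | s0 :: rest => render (out ++ PySem.Chars.rstrip (pending ++ s0)) (tokL rest))
      else render out (tok cs) := by
  intro cs
  induction cs with
  | nil =>
    intro out started pending hne hws hp
    cases started with
    | false => simp [mach, hp rfl, tok, tokL, csplit, strip_nil, render]
    | true => simp [mach, csplit, render, tokL, rstrip_wsOnly hws]
  | cons c cs ih =>
    intro out started pending hne hws hp
    rw [mach_cons]
    by_cases hc : c = ','
    · have hstep : pvStepB (out, started, pending) c = (out, false, []) := by
        simp [pvStepB, hc]
      rw [hstep]
      have h1 := ih out false [] (by simp) (by intro x hx; cases hx) (fun _ => rfl)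
      simp only [Bool.false_eq_true, if_false] at h1
      rw [h1]
      cases started with
      | false => simp [hc, tok_comma]
      | true =>
        simp only [hc]
        rw [show csplit (',' :: cs) = [] :: csplit cs by simp [csplit]]
        simp only [if_pos trivial]
        rw [List.append_nil, rstrip_wsOnly hws, List.append_nil]
        rfl
    · by_cases hw : PySem.Chars.isspace c = true
      · cases started with
        | false =>
          have hstep : pvStepB (out, false, pending) c = (out, false, pending) := by
            simp [pvStepB, hc, hw]
          rw [hstep, hp rfl]
          have h1 := ih out false [] (by simp) (by intro x hx; cases hx) (fun _ => rfl)
          simp only [Bool.false_eq_true, if_false] at h1 ⊢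
          rw [h1, tok_ws hc hw]
        | true =>
          have hws' : wsOnly (pending ++ [c]) := by
            intro x hx
            rcases List.mem_append.mp hx with h | h
            · exact hws x h
            · simp at h; subst h; exact hw
          have hstep : pvStepB (out, true, pending) c = (out, true, pending ++ [c]) := by
            simp [pvStepB, hc, hw]
          rw [hstep]
          have h1 := ih out true (pending ++ [c]) hne hws' (by simp)
          simp only [] at h1 ⊢
          rw [h1]
          obtain ⟨s0, rest, hcs, hccs⟩ := csplit_cons_nc hc cs
          rw [hcs, hccs]
          simp
      · have hwf : PySem.Chars.isspace c = false := by simpa using hw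
        obtain ⟨s0, rest, hcs, hccs⟩ := csplit_cons_nc hc cs
        cases started with
        | false =>
          have hstep : pvStepB (out, false, pending) c
              = ((if out.isEmpty then out else out ++ [',', ' ']) ++ [c], true, []) := by
            simp [pvStepB, hc, hwf]
          rw [hstep]
          have h1 := ih ((if out.isEmpty then out else out ++ [',', ' ']) ++ [c]) true []
            (by intro _; simp) (by intro x hx; cases hx) (by intro h; cases h)
          simp only [] at h1
          rw [h1, hcs]
          simp only [Bool.false_eq_true, if_false]
          have hstrip : PySem.Chars.strip (c :: s0) = c :: PySem.Chars.rstrip s0 :=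
            strip_cons_nws hwf s0
          simp only [tok, tokL, hccs, List.map_cons, List.filter_cons, hstrip]
          simp only [List.isEmpty_cons, Bool.not_false, render]
          cases h : out.isEmpty with
          | true =>
            have hnil : out = [] := List.isEmpty_iff.mp h
            subst hnil; simp
          | false =>
            have hne2 : out ≠ [] := fun hq => by simp [hq] at h
            simp [if_neg hne2]
        | true =>
          have hstep : pvStepB (out, true, pending) c
              = (out ++ pending ++ [c], true, []) := by
            simp [pvStepB, hc, hwf]
          rw [hstep]
          have h1 := ih (out ++ pending ++ [c]) true [] (by intro _; simp)
            (by intro x hx; cases hx) (by intro h; cases h)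
          rw [h1, hcs, hccs]
          simp [rstrip_append_cons hwf pending s0]

theorem mach_top (cs out : List Char) :
    (mach cs out false []).1 = render out (tok cs) := by
  have h := mach_spec cs out false [] (by intro h; cases h) (by intro c h; cases h) (fun _ => rfl)
  simpa using h

theorem render_append (out : List Char) (a b : List (List Char)) :
    render out (a ++ b) = render (render out a) b := by
  simp [render, List.foldl_append]

/-- The outer fold of B produces `render []` of all the tokens. -/
theorem alt_outer_eq : ∀ (parts : List String) (out : List Char),
    (parts.foldl
      (fun (st : List Char × Bool × List Char) part =>
        if part == "" then st
        else
          let st2 := part.toList.foldl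
            pvStepB
            st
          (st2.1, false, []))
      (out, false, ([] : List Char))).1
    = render out (((parts.filter (fun p => !(p == ""))).map String.toList).flatMap tok) := by
  intro parts
  induction parts with
  | nil => intro out; simp [render]
  | cons p rest ih =>
    intro out
    by_cases hp : p = ""
    · subst hp
      simp only [List.foldl_cons, beq_self_eq_true, if_true, List.filter_cons,
        Bool.not_true, Bool.false_eq_true, if_false]
      exact ih out
    · have hbe : (p == "") = false := by simpa using hp
      simp only [List.foldl_cons, hbe, Bool.false_eq_true, if_false, List.filter_cons,
        Bool.not_false, if_true, List.map_cons, List.flatMap_cons]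
      rw [foldl_eq_mach]
      have := mach_top p.toList out
      rw [ih, this, render_append]

/-- tokens produced by `tok` are non-empty, and `render []` of such a list is the ", "-join. -/
theorem render_ne_empty (out : List Char) (hout : out ≠ []) (ts : List (List Char)) :
    render out ts = out ++ ts.flatMap (fun t => [',', ' '] ++ t) := by
  induction ts generalizing out with
  | nil => simp [render]
  | cons t ts ih =>
    have h1 : (out.isEmpty) = false := by simpa using hout
    have hstep : render out (t :: ts) = render (out ++ [',', ' '] ++ t) ts := by
      simp [render, hout]
    rw [hstep, ih (out ++ [',', ' '] ++ t) (by simp)]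
    simp

theorem join_flatMap (t : List Char) (ts : List (List Char)) :
    PySem.Chars.join ", ".toList (t :: ts)
      = t ++ ts.flatMap (fun u => [',', ' '] ++ u) := by
  induction ts generalizing t with
  | nil => simp [PySem.Chars.join_singleton]
  | cons u ts ih =>
    rw [PySem.Chars.join_cons_cons, ih u]
    simp

theorem render_nil_eq_join (ts : List (List Char)) (h : ∀ t ∈ ts, t ≠ []) :
    render [] ts = PySem.Chars.join ", ".toList ts := by
  cases ts with
  | nil => simp [render, PySem.Chars.join_nil]
  | cons t ts =>
    have ht : t ≠ [] := h t (by simp)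
    have : render [] (t :: ts) = render t ts := by
      simp [render]
    rw [this, render_ne_empty t ht ts, join_flatMap]

theorem tok_mem_ne_nil (cs : List Char) (t : List Char) (h : t ∈ tok cs) : t ≠ [] := by
  simp only [tok, tokL, List.mem_filter] at h
  intro hnil
  subst hnil
  simpa using h.2

theorem A_closed (parts : List String) :
    normalize_caption parts
      = String.ofList (PySem.Chars.join ", ".toList
          (((parts.filter (fun p => !(p == ""))).map String.toList).flatMap tok)) := by
  simp only [normalize_caption]
  rw [outer_fold_eq parts [], List.nil_append]

theorem B_closed (parts : List String) :
    normalize_caption_alt parts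
      = String.ofList (render []
          (((parts.filter (fun p => !(p == ""))).map String.toList).flatMap tok)) := by
  simp only [normalize_caption_alt]
  rw [alt_outer_eq parts []]

-- ===== VERDICT (by name: the statement is the Claim_ definition above) =====
theorem normalize_caption_spec : Claim_equal_normalize_caption := by
  intro parts _
  unfold Spec_normalize_caption
  rw [A_closed, B_closed, render_nil_eq_join]
  intro t ht
  simp only [List.mem_flatMap] at ht
  obtain ⟨cs, _, htok⟩ := ht
  exact tok_mem_ne_nil cs t htok
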